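-- pv_equiv track=rewrite | github.com/mooja/dailyprogrammer | challenge305easy.py | permbase2
-- ===== SOURCE A (Python) =====
-- from itertools import product
--
-- def permbase2(idx):
--     def iter():
--         r = 1
--         while True:
--             for p in product('01', repeat=r):
--                 yield ''.join(p)
--             r += 1
--
--     for i, item in enumerate(iter()):
--         if i == idx:
--             return item
-- ===== SOURCE B (Python) =====
-- def permbase2(idx):
--     return bin(idx + 2)[3:]
-- ===== Notes on version B (the rewrite author's own statement) =====
-- stated objective: faster
-- what changed: B replaces A's element-by-element enumeration of all binary strings up to index idx with direct arithmetic: the idx-th string is the binary representation of idx+2 with its leading '1' removed (bin(idx+2)[3:]).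
import Mathlib
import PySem

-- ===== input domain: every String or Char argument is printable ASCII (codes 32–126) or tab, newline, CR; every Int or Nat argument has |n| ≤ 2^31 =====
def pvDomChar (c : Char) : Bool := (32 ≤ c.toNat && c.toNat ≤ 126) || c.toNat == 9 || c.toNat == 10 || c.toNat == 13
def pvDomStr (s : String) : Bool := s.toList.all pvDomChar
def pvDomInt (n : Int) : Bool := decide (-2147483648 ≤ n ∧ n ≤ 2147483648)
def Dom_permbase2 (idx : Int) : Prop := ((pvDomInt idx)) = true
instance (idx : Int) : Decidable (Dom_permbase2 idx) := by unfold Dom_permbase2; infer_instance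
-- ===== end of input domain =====

-- B: closed form — the idx-th string is bin(idx+2) with the leading '1' dropped (O(log idx) vs A's O(idx) enumeration).

-- ===== PORT A =====
-- product('01', repeat=r), in itertools order (leftmost position varies slowest)
def aProd : Nat → List (List Char)
  | 0 => [[]]
  | r + 1 => ['0', '1'].flatMap (fun c => (aProd r).map (fun s => c :: s))

-- the inner 'for i, item in enumerate(...): if i == idx: return item' restricted to one bucket:
-- walks the bucket's items with the running enumerate counter i, returns the item when i == idx
def aFor : List (List Char) → Nat → Nat → Option String
  | [], _, _ => none
  | p :: rest, i, idx => if i = idx then some (String.mk p) else aFor rest (i + 1) idx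

-- the outer generator loop: bucket r after bucket r+1, counter i running on; fuel makes it total
-- (idx+1 steps always suffice since every bucket advances i by ≥ 2)
def aIter (idx : Nat) : Nat → Nat → Nat → String
  | _, _, 0 => ""
  | i, r, fuel + 1 =>
    match aFor (aProd r) i idx with
    | some s => s
    | none => aIter idx (i + (aProd r).length) (r + 1) fuel

def permbase2 (idx : Int) : String :=
  if idx < 0 then "" else aIter idx.toNat 0 1 (idx.toNat + 1)

-- ===== PORT B =====
-- binary digits of n (MSB first), empty for 0; the digit loop behind Python's bin()
def binDigits (n : Nat) : List Char :=
  if h : n = 0 then [] else binDigits (n / 2) ++ [if n % 2 = 1 then '1' else '0']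
  decreasing_by exact Nat.div_lt_self (Nat.pos_of_ne_zero h) (by norm_num)

-- Python's bin(m): '0b' prefix, '-' sign, bin(0) = '0b0'
def pyBin (m : Int) : List Char :=
  if m < 0 then '-' :: '0' :: 'b' :: binDigits m.natAbs
  else '0' :: 'b' :: (if m = 0 then ['0'] else binDigits m.toNat)

-- bin(idx + 2)[3:]
def permbase2_alt (idx : Int) : String := String.mk ((pyBin (idx + 2)).drop 3)

-- ===== PRECONDITION & SPEC =====
-- Pre_ excludes negative idx, on which Python A loops forever (no value is returned).
def Pre_permbase2 (idx : Int) : Prop := 0 ≤ idx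
instance (idx : Int) : Decidable (Pre_permbase2 idx) := by unfold Pre_permbase2; infer_instance
def pvWitness_permbase2 : Int := (5)

def Spec_permbase2 (idx : Int) (out : String) : Prop := out = permbase2_alt idx
instance (idx : Int) (out : String) : Decidable (Spec_permbase2 idx out) := by unfold Spec_permbase2; infer_instance

-- ===== CLAIM (what is proved, stated in full; the proofs are below) =====
def Claim_equal_permbase2 : Prop := ∀ (idx : Int), Dom_permbase2 idx → Pre_permbase2 idx → Spec_permbase2 idx (permbase2 idx)

-- ===== LEMMAS AND PROOFS =====

theorem aProd_length (r : Nat) : (aProd r).length = 2 ^ r := by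
  induction r with
  | zero => rfl
  | succ r ih => simp [aProd, ih, pow_succ]; ring

theorem snoc_map_comm (c : Char) (L : List (List Char)) :
    (L.flatMap (fun s => [s ++ ['0'], s ++ ['1']])).map (fun s => c :: s)
      = (L.map (fun s => c :: s)).flatMap (fun s => [s ++ ['0'], s ++ ['1']]) := by
  induction L with
  | nil => rfl
  | cons p rest ih => simp [List.flatMap_cons, ih]

-- itertools.product's cons recursion equals the snoc recursion
theorem aProd_snoc (r : Nat) :
    aProd (r + 1) = (aProd r).flatMap (fun s => [s ++ ['0'], s ++ ['1']]) := by
  induction r with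
  | zero => rfl
  | succ r ih =>
    show ['0', '1'].flatMap (fun c => (aProd (r + 1)).map (fun s => c :: s)) = _
    conv_lhs => rw [ih]
    simp only [List.flatMap_cons, List.flatMap_nil, List.append_nil]
    rw [snoc_map_comm, snoc_map_comm]
    show _ = (['0','1'].flatMap fun c => (aProd r).map (fun s => c :: s)).flatMap
              (fun s => [s ++ ['0'], s ++ ['1']])
    simp [List.flatMap_cons, List.flatMap_append]

-- indexing a flatMap with uniform block size 2
theorem flatMap2_getD (L : List (List Char)) (j : Nat) (hj : j < 2 * L.length) :
    (L.flatMap (fun s => [s ++ ['0'], s ++ ['1']])).getD j []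
      = L.getD (j / 2) [] ++ [if j % 2 = 1 then '1' else '0'] := by
  induction L generalizing j with
  | nil => simp at hj
  | cons p rest ih =>
    match j with
    | 0 => rfl
    | 1 => rfl
    | j + 2 =>
      have hcons : (p :: rest).flatMap (fun s => [s ++ ['0'], s ++ ['1']])
          = (p ++ ['0']) :: (p ++ ['1']) :: rest.flatMap (fun s => [s ++ ['0'], s ++ ['1']]) := by
        simp [List.flatMap_cons]
      rw [hcons, List.getD_cons_succ, List.getD_cons_succ]
      have hd : (j + 2) / 2 = j / 2 + 1 := by omega
      have hm : (j + 2) % 2 = j % 2 := by omega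
      rw [hd, hm, List.getD_cons_succ]
      exact ih j (by simp only [List.length_cons] at hj; omega)

-- the j-th length-r binary string is the binary of j + 2^r without its leading '1'
theorem aProd_getD (r j : Nat) (hj : j < 2 ^ r) :
    binDigits (j + 2 ^ r) = '1' :: (aProd r).getD j [] := by
  induction r generalizing j with
  | zero =>
    have hj0 : j = 0 := by simpa using hj
    subst hj0
    show binDigits 1 = '1' :: (aProd 0).getD 0 []
    have h0 : binDigits 0 = [] := by rw [binDigits]; simp
    rw [binDigits]
    simp [h0, aProd]
  | succ r ih =>
    rw [binDigits]
    have h2 : 2 ^ (r + 1) = 2 * 2 ^ r := by ring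
    have hne : j + 2 ^ (r + 1) ≠ 0 := by positivity
    rw [dif_neg hne]
    have hdiv : (j + 2 ^ (r + 1)) / 2 = j / 2 + 2 ^ r := by omega
    have hmod : (j + 2 ^ (r + 1)) % 2 = j % 2 := by omega
    rw [hdiv, hmod, ih (j / 2) (by omega)]
    rw [aProd_snoc, flatMap2_getD _ j (by rw [aProd_length]; omega)]
    rfl

theorem aFor_spec (items : List (List Char)) (idx : Nat) :
    ∀ i, aFor items i idx
      = if i ≤ idx ∧ idx - i < items.length
        then some (String.mk (items.getD (idx - i) [])) else none := by
  induction items with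
  | nil => intro i; simp [aFor]
  | cons p rest ih =>
    intro i
    rw [aFor]
    by_cases h : i = idx
    · subst h
      simp [List.getD]
    · rw [if_neg h, ih (i + 1)]
      by_cases h1 : i + 1 ≤ idx ∧ idx - (i + 1) < rest.length
      · rw [if_pos h1, if_pos (by simp only [List.length_cons]; omega)]
        have hgd : (p :: rest).getD (idx - i) [] = rest.getD (idx - (i + 1)) [] := by
          have hk : idx - i = (idx - (i + 1)) + 1 := by omega
          rw [hk]; rfl
        rw [hgd]
      · rw [if_neg h1, if_neg (by simp only [List.length_cons]; omega)]

theorem aIter_spec (fuel : Nat) :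
    ∀ r i idx, i ≤ idx → idx - i < fuel * 2 ^ r →
      aIter idx i r fuel = String.mk ((binDigits ((idx - i) + 2 ^ r)).drop 1) := by
  induction fuel with
  | zero => intro r i idx h1 h2; omega
  | succ fuel ih =>
    intro r i idx h1 h2
    rw [aIter, aFor_spec, aProd_length]
    by_cases hin : idx - i < 2 ^ r
    · rw [if_pos ⟨h1, hin⟩]
      rw [aProd_getD r (idx - i) hin]
      rfl
    · rw [if_neg (by tauto)]
      have hps : 2 ^ (r + 1) = 2 ^ r + 2 ^ r := by rw [pow_succ]; omega
      have h2' : fuel * 2 ^ (r + 1) = fuel * 2 ^ r + fuel * 2 ^ r := by rw [hps]; ring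
      have hmul : (fuel + 1) * 2 ^ r = fuel * 2 ^ r + 2 ^ r := by ring
      rw [ih (r + 1) (i + 2 ^ r) idx (by omega) (by omega)]
      have harg : idx - (i + 2 ^ r) + 2 ^ (r + 1) = idx - i + 2 ^ r := by omega
      rw [harg]

-- ===== VERDICT (by name: the statement is the Claim_ definition above) =====
theorem permbase2_spec : Claim_equal_permbase2 := by
  intro idx _ hpre
  unfold Pre_permbase2 at hpre
  unfold Spec_permbase2 permbase2 permbase2_alt pyBin
  rw [if_neg (by omega), if_neg (by omega), if_neg (by omega)]
  have htn : (idx + 2).toNat = idx.toNat + 2 := by omega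
  rw [htn]
  rw [aIter_spec (idx.toNat + 1) 1 0 idx.toNat (by omega) (by omega)]
  simp only [Nat.sub_zero, pow_one]
  rfl
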